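-- pv_equiv track=rewrite | github.com/levi-sledd/presentations | presentations.py | shortLexSuccessor
-- ===== SOURCE A (Python) =====
-- def odometerSuccessor(list, alphabet):
--     if list == []:
--         return []
--     elif list[-1] != alphabet[-1]:
--         return list[:len(list)-1] + [alphabet[alphabet.index(list[-1])+1]]
--     else:
--         return odometerSuccessor(list[:len(list)-1], alphabet) + [alphabet[0]]
--
-- def shortLexSuccessor(list, alphabet):
--     if list == []:
--         return [alphabet[0]]
--     else:
--         isAllLastLetter = True
--         for i in range(len(list)):
--             if list[i] != alphabet[-1]:
--                 isAllLastLetter = False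
--         if isAllLastLetter:
--             return [alphabet[0]] + odometerSuccessor(list, alphabet)
--         else:
--             return odometerSuccessor(list, alphabet)
-- ===== SOURCE B (Python) =====
-- def shortLexSuccessor(list, alphabet):
--     if list == []:
--         return [alphabet[0]]
--     result = list.copy()
--     i = len(result) - 1
--     while i >= 0 and result[i] == alphabet[-1]:
--         result[i] = alphabet[0]
--         i -= 1
--     if i < 0:
--         return [alphabet[0]] + result
--     result[i] = alphabet[alphabet.index(result[i]) + 1]
--     return result
-- ===== Notes on version B (the rewrite author's own statement) =====
-- stated objective: faster
-- what changed: Replaced the all-maximal scan plus the recursive odometerSuccessor helper (which copies a list[:n-1] slice at every carry step) by a single iterative right-to-left carry pass over one copy of the list.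
import Mathlib
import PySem

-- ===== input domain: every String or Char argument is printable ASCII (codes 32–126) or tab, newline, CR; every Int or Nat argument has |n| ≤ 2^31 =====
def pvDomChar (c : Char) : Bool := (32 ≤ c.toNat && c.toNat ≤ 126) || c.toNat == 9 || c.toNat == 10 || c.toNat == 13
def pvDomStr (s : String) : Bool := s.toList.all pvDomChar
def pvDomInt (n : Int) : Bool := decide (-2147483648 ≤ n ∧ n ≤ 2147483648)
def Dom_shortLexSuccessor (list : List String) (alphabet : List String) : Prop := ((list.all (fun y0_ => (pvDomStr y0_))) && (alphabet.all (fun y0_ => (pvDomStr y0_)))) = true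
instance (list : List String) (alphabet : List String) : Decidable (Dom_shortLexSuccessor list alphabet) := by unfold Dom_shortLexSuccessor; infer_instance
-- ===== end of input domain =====

-- B replaces A's all-maximal scan + recursive slicing helper by one iterative carry pass (no per-step slice copies; measured faster).

-- ===== PORT A =====
-- termination helper for odometerSuccessor's recursion on list[:len(list)-1]
theorem pvSlicePredLen {α : Type} (xs : List α) (h : xs ≠ []) :
    (PySem.List.slice xs (some 0) (some ((xs.length : Int) - 1))).length < xs.length := by
  have : ((xs.length : Int) - 1) = ((xs.length - 1 : Nat) : Int) := by
    cases xs with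
    | nil => simp at h
    | cons a l => simp [List.length_cons]
  rw [this]
  simp [PySem.List.slice_zero_start, PySem.List.slice_to_natCast]
  cases xs with
  | nil => simp at h
  | cons a l => simp

def odometerSuccessor (list : List String) (alphabet : List String) : List String :=
  if h : list = [] then []
  else if PySem.List.pyGetD list (-1) "" ≠ PySem.List.pyGetD alphabet (-1) "" then
    PySem.List.slice list (some 0) (some ((list.length : Int) - 1)) ++
      [PySem.List.pyGetD alphabet
        (((PySem.List.index? alphabet (PySem.List.pyGetD list (-1) "")).getD 0 : Int) + 1) ""]
  else
    odometerSuccessor (PySem.List.slice list (some 0) (some ((list.length : Int) - 1))) alphabet ++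
      [PySem.List.pyGetD alphabet 0 ""]
termination_by list.length
decreasing_by exact pvSlicePredLen list h

def shortLexSuccessor (list : List String) (alphabet : List String) : List String :=
  if list = [] then [PySem.List.pyGetD alphabet 0 ""]
  else
    let isAllLastLetter :=
      (PySem.List.pyRange 0 (PySem.List.len list) 1).foldl
        (fun acc i =>
          if PySem.List.pyGetD list i "" ≠ PySem.List.pyGetD alphabet (-1) "" then false else acc)
        true
    if isAllLastLetter then
      PySem.List.pyGetD alphabet 0 "" :: odometerSuccessor list alphabet
    else
      odometerSuccessor list alphabet

-- ===== PORT B =====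
-- the while loop: j encodes i+1 (j = 0 ⟺ i < 0); res[i] == alphabet[-1] → res[i] = alphabet[0], i -= 1
def slsLoop (alphabet : List String) (res : List String) (j : Nat) : List String × Nat :=
  match j with
  | 0 => (res, 0)
  | k + 1 =>
    if PySem.List.pyGetD res (k : Int) "" = PySem.List.pyGetD alphabet (-1) "" then
      slsLoop alphabet (PySem.List.pySetD res (k : Int) (PySem.List.pyGetD alphabet 0 "")) k
    else (res, k + 1)

def shortLexSuccessor_alt (list : List String) (alphabet : List String) : List String :=
  if list = [] then [PySem.List.pyGetD alphabet 0 ""]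
  else
    let p := slsLoop alphabet list list.length
    if p.2 = 0 then
      PySem.List.pyGetD alphabet 0 "" :: p.1
    else
      PySem.List.pySetD p.1 ((p.2 - 1 : Nat) : Int)
        (PySem.List.pyGetD alphabet
          (((PySem.List.index? alphabet (PySem.List.pyGetD p.1 ((p.2 - 1 : Nat) : Int) "")).getD 0 : Int) + 1) "")

-- ===== PRECONDITION & SPEC =====
-- Pre_ excludes exactly the inputs where the Python A raises: empty alphabet (IndexError on
-- alphabet[0]/alphabet[-1]) and a rightmost non-maximal element not in alphabet (ValueError in .index).
def Pre_shortLexSuccessor (list : List String) (alphabet : List String) : Prop :=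
  alphabet ≠ [] ∧
  ((list.reverse.find? (fun x => x != alphabet.getLastD "")).all
    (fun x => alphabet.contains x)) = true
instance (list : List String) (alphabet : List String) : Decidable (Pre_shortLexSuccessor list alphabet) := by unfold Pre_shortLexSuccessor; infer_instance

def pvWitness_shortLexSuccessor : List String × List String := (["a", "b"], ["a", "b", "c"])

def Spec_shortLexSuccessor (list : List String) (alphabet : List String) (out : List String) : Prop := out = shortLexSuccessor_alt list alphabet
instance (list : List String) (alphabet : List String) (out : List String) : Decidable (Spec_shortLexSuccessor list alphabet out) := by unfold Spec_shortLexSuccessor; infer_instance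

-- ===== CLAIM (what is proved, stated in full; the proofs are below) =====
def Claim_equal_shortLexSuccessor : Prop := ∀ (list : List String) (alphabet : List String), Dom_shortLexSuccessor list alphabet → Pre_shortLexSuccessor list alphabet → Spec_shortLexSuccessor list alphabet (shortLexSuccessor list alphabet)

-- ===== LEMMAS AND PROOFS =====

-- abbreviations for the three alphabet lookups both ports share
def pvAL (alphabet : List String) : String := PySem.List.pyGetD alphabet (-1) ""
def pvA0 (alphabet : List String) : String := PySem.List.pyGetD alphabet 0 ""
def pvInc (alphabet : List String) (s : String) : String :=
  PySem.List.pyGetD alphabet (((PySem.List.index? alphabet s).getD 0 : Int) + 1) ""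

theorem odo_nil (alphabet : List String) : odometerSuccessor [] alphabet = [] := by
  rw [odometerSuccessor]; simp

theorem slice_pred_append (xs : List String) (x : String) :
    PySem.List.slice (xs ++ [x]) (some 0) (some (((xs ++ [x]).length : Int) - 1)) = xs := by
  have h1 : (((xs ++ [x]).length : Int) - 1) = ((xs.length : Nat) : Int) := by
    simp
  rw [h1, PySem.List.slice_zero_start, PySem.List.slice_to_natCast]
  exact List.take_left

theorem odo_append (alphabet : List String) (xs : List String) (x : String) :
    odometerSuccessor (xs ++ [x]) alphabet =
      if x = pvAL alphabet then odometerSuccessor xs alphabet ++ [pvA0 alphabet]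
      else xs ++ [pvInc alphabet x] := by
  rw [odometerSuccessor]
  have hne : xs ++ [x] ≠ [] := by simp
  rw [dif_neg hne]
  rw [PySem.List.pyGetD_neg_one_append_singleton, slice_pred_append]
  by_cases hx : x = pvAL alphabet
  · rw [if_neg (by simp [pvAL] at hx ⊢; exact hx), if_pos hx]
    rfl
  · rw [if_pos (by simp [pvAL] at hx ⊢; exact hx), if_neg hx]
    rfl


theorem slsLoop_length (alphabet : List String) (j : Nat) :
    ∀ res : List String, (slsLoop alphabet res j).1.length = res.length := by
  induction j with
  | zero => intro res; simp [slsLoop]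
  | succ k ih =>
    intro res
    rw [slsLoop]
    split
    · rw [ih]; simp
    · rfl

theorem slsLoop_pref (alphabet : List String) (j : Nat) :
    ∀ xs ys : List String, j ≤ xs.length →
      slsLoop alphabet (xs ++ ys) j =
        ((slsLoop alphabet xs j).1 ++ ys, (slsLoop alphabet xs j).2) := by
  induction j with
  | zero => intro xs ys _; simp [slsLoop]
  | succ k ih =>
    intro xs ys hj
    have hk : k < xs.length := by omega
    have hget : PySem.List.pyGetD (xs ++ ys) (k : Int) "" = PySem.List.pyGetD xs (k : Int) "" := by
      simp [List.getD_eq_getElem?_getD, List.getElem?_append_left hk]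
    rw [slsLoop, slsLoop, hget]
    split
    · have hset : PySem.List.pySetD (xs ++ ys) (k : Int)
          (PySem.List.pyGetD alphabet 0 "") =
          PySem.List.pySetD xs (k : Int) (PySem.List.pyGetD alphabet 0 "") ++ ys := by
        simp [List.set_append_left _ _ hk]
      rw [hset, ih]
      simp; omega
    · rfl

theorem foldl_allLast (a : String) (l : List String) :
    ∀ b : Bool,
      l.foldl (fun acc x => if x ≠ a then false else acc) b =
        (b && l.all (fun x => x == a)) := by
  induction l with
  | nil => intro b; simp
  | cons y ys ih =>
    intro b
    simp only [List.foldl_cons, List.all_cons]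
    by_cases hy : y = a
    · rw [if_neg (by simp [hy]), ih]
      simp [hy]
    · rw [if_pos (by simp [hy]), ih]
      simp [hy]

theorem slsMain (alphabet : List String) (l : List String) :
    ((slsLoop alphabet l l.length).2 = 0 →
       (l.all (fun x => x == pvAL alphabet)) = true ∧
       odometerSuccessor l alphabet = (slsLoop alphabet l l.length).1)
    ∧ (∀ k, (slsLoop alphabet l l.length).2 = k + 1 →
       (l.all (fun x => x == pvAL alphabet)) = false ∧ k < l.length ∧
       odometerSuccessor l alphabet =
         PySem.List.pySetD (slsLoop alphabet l l.length).1 (k : Int)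
           (pvInc alphabet
             (PySem.List.pyGetD (slsLoop alphabet l l.length).1 (k : Int) ""))) := by
  induction l using List.reverseRecOn with
  | nil =>
    constructor
    · intro _; exact ⟨by simp, by simp [odo_nil, slsLoop]⟩
    · intro k hk; simp [slsLoop] at hk
  | append_singleton xs x ih =>
    have hlen : (xs ++ [x]).length = xs.length + 1 := by simp
    have hget : PySem.List.pyGetD (xs ++ [x]) ((xs.length : Nat) : Int) "" = x := by
      simp [List.getD_eq_getElem?_getD]
    by_cases hx : x = pvAL alphabet
    · -- carry case: x is the last letter
      have hset : PySem.List.pySetD (xs ++ [x]) ((xs.length : Nat) : Int)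
          (PySem.List.pyGetD alphabet 0 "") = xs ++ [pvA0 alphabet] := by
        simp [pvA0]
      have hstep : slsLoop alphabet (xs ++ [x]) (xs ++ [x]).length =
          ((slsLoop alphabet xs xs.length).1 ++ [pvA0 alphabet],
           (slsLoop alphabet xs xs.length).2) := by
        rw [hlen, slsLoop, hget, if_pos (by simp [pvAL] at hx ⊢; exact hx), hset]
        exact slsLoop_pref alphabet xs.length xs [pvA0 alphabet] le_rfl
      rw [hstep]
      constructor
      · intro hj0
        obtain ⟨hall, hodo⟩ := ih.1 hj0
        refine ⟨by simp [hall, hx], ?_⟩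
        rw [odo_append, if_pos hx, hodo]
      · intro k hjk
        obtain ⟨hall, hklt, hodo⟩ := ih.2 k hjk
        have hrlen : (slsLoop alphabet xs xs.length).1.length = xs.length :=
          slsLoop_length alphabet xs.length xs
        refine ⟨by simp [hall], by simp; omega, ?_⟩
        rw [odo_append, if_pos hx, hodo]
        have hkr : k < (slsLoop alphabet xs xs.length).1.length := by omega
        have hg : PySem.List.pyGetD ((slsLoop alphabet xs xs.length).1 ++ [pvA0 alphabet]) (k : Int) "" =
            PySem.List.pyGetD (slsLoop alphabet xs xs.length).1 (k : Int) "" := by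
          simp [List.getD_eq_getElem?_getD, List.getElem?_append_left hkr]
        rw [hg]
        simp [List.set_append_left _ _ hkr]
    · -- stop case: x is not the last letter
      have hstep : slsLoop alphabet (xs ++ [x]) (xs ++ [x]).length =
          (xs ++ [x], xs.length + 1) := by
        rw [hlen, slsLoop, hget, if_neg (by simp [pvAL] at hx ⊢; exact hx)]
      rw [hstep]
      constructor
      · intro hj0; simp at hj0
      · intro k hjk
        simp only at hjk
        have hk : k = xs.length := by omega
        subst hk
        refine ⟨by simp [hx], by simp, ?_⟩
        rw [odo_append, if_neg hx, hget]
        simp [pvInc]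

-- ===== VERDICT (by name: the statement is the Claim_ definition above) =====
theorem shortLexSuccessor_spec : Claim_equal_shortLexSuccessor := by
  intro list alphabet _ _
  unfold Spec_shortLexSuccessor
  by_cases hnil : list = []
  · subst hnil; rfl
  · rw [shortLexSuccessor, shortLexSuccessor_alt, if_neg hnil]
    simp only [if_neg hnil]
    have hscan :
        (PySem.List.pyRange 0 (PySem.List.len list) 1).foldl
          (fun acc i =>
            if PySem.List.pyGetD list i "" ≠ PySem.List.pyGetD alphabet (-1) "" then false else acc)
          true = list.all (fun x => x == pvAL alphabet) := by
      simp only [pvAL]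
      rw [PySem.List.foldl_pyRange_zero_pyGetD list ""
        (fun acc x => if x ≠ PySem.List.pyGetD alphabet (-1) "" then false else acc) true]
      rw [foldl_allLast]
      simp
    rw [hscan]
    cases hj : (slsLoop alphabet list list.length).2 with
    | zero =>
      obtain ⟨hall, hodo⟩ := (slsMain alphabet list).1 hj
      rw [hall, if_pos rfl, hodo]
      simp
    | succ k =>
      obtain ⟨hall, _, hodo⟩ := (slsMain alphabet list).2 k hj
      rw [hall]
      simp [hodo, pvInc]
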